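-- pv_equiv track=rewrite | github.com/thevitorhideki/academia-python | lists/hard/organiza_filas.py | organiza_filas
-- ===== SOURCE A (Python) =====
-- def organiza_filas(subscribes: list[list[str, int]]) -> list[list[str]]:
--     queue = [[], [], [], []]
--
--     for i in subscribes:
--         if i[1] <= 20:
--             queue[0].append(i[0])
--         elif i[1] <= 40:
--             queue[1].append(i[0])
--         elif i[1] <= 60:
--             queue[2].append(i[0])
--         else:
--             queue[3].append(i[0])
--
--     return queue
-- ===== SOURCE B (Python) =====
-- def organiza_filas(subscribes: list[list[str, int]]) -> list[list[str]]:
--     bounds = [(None, 20), (20, 40), (40, 60), (60, None)]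
--     return [
--         [name for name, age in subscribes
--          if (lo is None or lo < age) and (hi is None or age <= hi)]
--         for lo, hi in bounds
--     ]
-- ===== Notes on version B (the rewrite author's own statement) =====
-- stated objective: alternative
-- what changed: Instead of one pass that appends each record into one of four mutable queues, B makes four independent filtering passes, one per age interval, building each queue as a comprehension over the whole list.
import Mathlib
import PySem

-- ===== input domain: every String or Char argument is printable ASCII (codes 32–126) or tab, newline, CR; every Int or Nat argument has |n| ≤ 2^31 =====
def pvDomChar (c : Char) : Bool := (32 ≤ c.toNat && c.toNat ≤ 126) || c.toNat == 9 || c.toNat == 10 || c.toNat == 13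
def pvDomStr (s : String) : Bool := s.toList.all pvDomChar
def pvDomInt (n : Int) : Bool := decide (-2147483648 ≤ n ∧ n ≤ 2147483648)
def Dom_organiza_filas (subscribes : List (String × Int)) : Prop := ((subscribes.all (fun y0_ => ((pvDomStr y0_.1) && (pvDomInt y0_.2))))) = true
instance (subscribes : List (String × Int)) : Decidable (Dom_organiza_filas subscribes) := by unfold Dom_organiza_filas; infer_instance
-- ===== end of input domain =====

-- B builds each of the four queues by its own filtering pass over the whole list
-- (one comprehension per age interval) instead of A's single pass appending into
-- four mutable queues (alternative decomposition, same O(n) total cost).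

-- ===== PORT A =====
-- A's four queues kept as a 4-tuple of lists; each branch appends to the end of its queue.
def organiza_filas (subscribes : List (String × Int)) : List (List String) :=
  let q := subscribes.foldl
    (fun (q : List String × List String × List String × List String) i =>
      if i.2 ≤ 20 then (q.1 ++ [i.1], q.2.1, q.2.2.1, q.2.2.2)
      else if i.2 ≤ 40 then (q.1, q.2.1 ++ [i.1], q.2.2.1, q.2.2.2)
      else if i.2 ≤ 60 then (q.1, q.2.1, q.2.2.1 ++ [i.1], q.2.2.2)
      else (q.1, q.2.1, q.2.2.1, q.2.2.2 ++ [i.1]))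
    ([], [], [], [])
  [q.1, q.2.1, q.2.2.1, q.2.2.2]

-- ===== PORT B =====
-- Source B's `(lo is None or lo < age) and (hi is None or age <= hi)` test, verbatim.
def inBounds (lo hi : Option Int) (age : Int) : Bool :=
  (lo.isNone || decide (lo.getD 0 < age)) && (hi.isNone || decide (age ≤ hi.getD 0))

def organiza_filas_alt (subscribes : List (String × Int)) : List (List String) :=
  [(none, some 20), (some 20, some 40), (some 40, some 60), (some 60, none)].map
    (fun b : Option Int × Option Int =>
      (subscribes.filter (fun p => inBounds b.1 b.2 p.2)).map Prod.fst)

-- ===== PRECONDITION & SPEC =====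
def Spec_organiza_filas (subscribes : List (String × Int)) (out : List (List String)) : Prop := out = organiza_filas_alt subscribes
instance (subscribes : List (String × Int)) (out : List (List String)) : Decidable (Spec_organiza_filas subscribes out) := by unfold Spec_organiza_filas; infer_instance

-- ===== CLAIM (what is proved, stated in full; the proofs are below) =====
def Claim_equal_organiza_filas : Prop := ∀ (subscribes : List (String × Int)), Dom_organiza_filas subscribes → Spec_organiza_filas subscribes (organiza_filas subscribes)

-- ===== LEMMAS AND PROOFS =====

theorem organiza_filas_aux :
    ∀ (subs : List (String × Int)) (a b c d : List String),
      (let q := subs.foldl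
        (fun (q : List String × List String × List String × List String) i =>
          if i.2 ≤ 20 then (q.1 ++ [i.1], q.2.1, q.2.2.1, q.2.2.2)
          else if i.2 ≤ 40 then (q.1, q.2.1 ++ [i.1], q.2.2.1, q.2.2.2)
          else if i.2 ≤ 60 then (q.1, q.2.1, q.2.2.1 ++ [i.1], q.2.2.2)
          else (q.1, q.2.1, q.2.2.1, q.2.2.2 ++ [i.1]))
        (a, b, c, d)
       [q.1, q.2.1, q.2.2.1, q.2.2.2])
      = [a ++ (subs.filter (fun p => inBounds none (some 20) p.2)).map Prod.fst,
         b ++ (subs.filter (fun p => inBounds (some 20) (some 40) p.2)).map Prod.fst,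
         c ++ (subs.filter (fun p => inBounds (some 40) (some 60) p.2)).map Prod.fst,
         d ++ (subs.filter (fun p => inBounds (some 60) none p.2)).map Prod.fst] := by
  intro subs
  induction subs with
  | nil => intro a b c d; simp
  | cons p t ih =>
    intro a b c d
    by_cases h1 : p.2 ≤ 20
    · have e0 : inBounds none (some 20) p.2 = true := by simp [inBounds]; omega
      have e1 : inBounds (some 20) (some 40) p.2 = false := by simp [inBounds]; omega
      have e2 : inBounds (some 40) (some 60) p.2 = false := by simp [inBounds]; omega
      have e3 : inBounds (some 60) none p.2 = false := by simp [inBounds]; omega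
      simp only [List.foldl_cons, if_pos h1, List.filter_cons, e0, e1, e2, e3,
        ih (a ++ [p.1]) b c d]
      simp
    · by_cases h2 : p.2 ≤ 40
      · have e0 : inBounds none (some 20) p.2 = false := by simp [inBounds]; omega
        have e1 : inBounds (some 20) (some 40) p.2 = true := by simp [inBounds]; omega
        have e2 : inBounds (some 40) (some 60) p.2 = false := by simp [inBounds]; omega
        have e3 : inBounds (some 60) none p.2 = false := by simp [inBounds]; omega
        simp only [List.foldl_cons, if_neg h1, if_pos h2, List.filter_cons, e0, e1, e2, e3,
          ih a (b ++ [p.1]) c d]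
        simp
      · by_cases h3 : p.2 ≤ 60
        · have e0 : inBounds none (some 20) p.2 = false := by simp [inBounds]; omega
          have e1 : inBounds (some 20) (some 40) p.2 = false := by simp [inBounds]; omega
          have e2 : inBounds (some 40) (some 60) p.2 = true := by simp [inBounds]; omega
          have e3 : inBounds (some 60) none p.2 = false := by simp [inBounds]; omega
          simp only [List.foldl_cons, if_neg h1, if_neg h2, if_pos h3, List.filter_cons,
            e0, e1, e2, e3, ih a b (c ++ [p.1]) d]
          simp
        · have e0 : inBounds none (some 20) p.2 = false := by simp [inBounds]; omega
          have e1 : inBounds (some 20) (some 40) p.2 = false := by simp [inBounds]; omega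
          have e2 : inBounds (some 40) (some 60) p.2 = false := by simp [inBounds]; omega
          have e3 : inBounds (some 60) none p.2 = true := by simp [inBounds]; omega
          simp only [List.foldl_cons, if_neg h1, if_neg h2, if_neg h3, List.filter_cons,
            e0, e1, e2, e3, ih a b c (d ++ [p.1])]
          simp

-- ===== VERDICT (by name: the statement is the Claim_ definition above) =====
theorem organiza_filas_spec : Claim_equal_organiza_filas := by
  intro subs _
  unfold Spec_organiza_filas organiza_filas organiza_filas_alt
  simpa using organiza_filas_aux subs [] [] [] []
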